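-- pv_equiv track=rewrite | github.com/garbagetrash/aoc2024 | src/solve9.py | calc_file
-- ===== SOURCE A (Python) =====
-- def calc_file(memory):
--     files = []
--     start = None
--     current = None
--     for i, m in enumerate(memory):
--         if start is not None and m != current:
--             end = i
--             files.append((start, end, end - start))
--             start = None
--         if start is None and m >= 0:
--             start = i
--             current = m
--     if start is not None:
--         # finish last file
--         end = len(memory)
--         files.append((start, end, end - start))
--
--     # flip files around
--     files = files[::-1]
--     return files
-- ===== SOURCE B (Python) =====
-- def calc_file(memory):
--     n = len(memory)
--     starts = [i for i in range(n) if i == 0 or memory[i] != memory[i - 1]]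
--     ends = starts[1:] + [n] if starts else []
--     return [(s, e, e - s)
--             for s, e in reversed(list(zip(starts, ends)))
--             if memory[s] >= 0]
-- ===== Notes on version B (the rewrite author's own statement) =====
-- stated objective: alternative
-- what changed: Replaces A's single-pass start/current state machine with staged index passes: compute the list of run-start boundaries by comparing each element with its predecessor, pair each start with the next boundary via zip, and emit the triples from the reversed pair list.
import Mathlib
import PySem

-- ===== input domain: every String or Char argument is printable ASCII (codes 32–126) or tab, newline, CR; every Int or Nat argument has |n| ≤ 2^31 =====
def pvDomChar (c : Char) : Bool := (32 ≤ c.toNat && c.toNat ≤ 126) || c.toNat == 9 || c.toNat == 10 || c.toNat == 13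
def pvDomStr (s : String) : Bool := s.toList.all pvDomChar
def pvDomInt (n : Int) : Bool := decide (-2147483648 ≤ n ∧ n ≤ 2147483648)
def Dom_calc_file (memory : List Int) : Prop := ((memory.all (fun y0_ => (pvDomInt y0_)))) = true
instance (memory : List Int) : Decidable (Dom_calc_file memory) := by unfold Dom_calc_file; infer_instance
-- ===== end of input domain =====

-- B replaces A's start/current state machine with staged index passes: run-start
-- boundaries by predecessor comparison, then zip starts with next boundaries
-- (objective: alternative).

-- ===== PORT A =====
-- the for-loop over enumerate(memory) with state (files, start, current);
-- start/current are carried together as an Option (start, current) since they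
-- are set and cleared together; the trailing [] case emits the final file.
def calcFileLoopA : List Int → Int → List (Int × Int × Int) → Option (Int × Int) → List (Int × Int × Int)
  | [], i, files, st =>
    match st with
    | none => files
    | some (s, _) => files ++ [(s, i, i - s)]   -- "finish last file", end = len(memory) = i
  | m :: rest, i, files, st =>
    -- 'if start is not None and m != current'
    let p : List (Int × Int × Int) × Option (Int × Int) :=
      match st with
      | some (s, c) => if m ≠ c then (files ++ [(s, i, i - s)], none) else (files, st)
      | none => (files, none)
    -- 'if start is None and m >= 0'
    let st2 : Option (Int × Int) :=
      match p.2 with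
      | none => if m ≥ 0 then some (i, m) else none
      | some sc => some sc
    calcFileLoopA rest (i + 1) p.1 st2

def calc_file (memory : List Int) : List (Int × Int × Int) :=
  (calcFileLoopA memory 0 [] none).reverse   -- files[::-1] = reverse

-- ===== PORT B =====
-- starts = [i for i in range(n) if i == 0 or memory[i] != memory[i-1]]
-- (indices from range(n) are always in range, so plain getD is exact here)
def calcFileStarts (memory : List Int) : List Nat :=
  (List.range memory.length).filter
    (fun i => i == 0 || !(memory.getD i 0 == memory.getD (i - 1) 0))

-- ends = starts[1:] + [n] if starts else []
def calcFileEnds (memory : List Int) : List Nat :=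
  if calcFileStarts memory = [] then []
  else (calcFileStarts memory).drop 1 ++ [memory.length]

-- the comprehension over reversed(list(zip(starts, ends))): filter then map
def calc_file_alt (memory : List Int) : List (Int × Int × Int) :=
  ((((calcFileStarts memory).zip (calcFileEnds memory)).reverse).filter
      (fun p => decide ((0 : Int) ≤ memory.getD p.1 0))).map
    (fun p => ((p.1 : Int), (p.2 : Int), (p.2 : Int) - (p.1 : Int)))

-- ===== PRECONDITION & SPEC =====
def Spec_calc_file (memory : List Int) (out : List (Int × Int × Int)) : Prop := out = calc_file_alt memory
instance (memory : List Int) (out : List (Int × Int × Int)) : Decidable (Spec_calc_file memory out) := by unfold Spec_calc_file; infer_instance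

-- ===== CLAIM (what is proved, stated in full; the proofs are below) =====
def Claim_equal_calc_file : Prop := ∀ (memory : List Int), Dom_calc_file memory → Spec_calc_file memory (calc_file memory)

-- ===== LEMMAS AND PROOFS =====

-- proof-side reference: maximal equal runs as (key, length) pairs
def calcFileGroups : List Int → List (Int × Nat)
  | [] => []
  | m :: rest =>
    (m, 1 + (rest.takeWhile (· = m)).length) :: calcFileGroups (rest.dropWhile (· = m))
  termination_by l => l.length
  decreasing_by
    simp only [List.length_cons]
    exact Nat.lt_succ_of_le (List.length_dropWhile_le _ _)

-- proof-side reference: the files in forward order, from groups and an offset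
def calcFileFwd : List (Int × Nat) → Nat → List (Int × Int × Int)
  | [], _ => []
  | (k, l) :: gs, off =>
    (if 0 ≤ k then [((off : Int), ((off + l : Nat) : Int), (l : Int))] else [])
      ++ calcFileFwd gs (off + l)

def pairsB (memory : List Int) : List (Nat × Nat) :=
  (calcFileStarts memory).zip (calcFileEnds memory)

-- ---------- A side ----------

theorem loopA_skip_neg (l : List Int) (h : ∀ x ∈ l, x < 0) :
    ∀ (t : List Int) (i : Int) (files : List (Int × Int × Int)),
      calcFileLoopA (l ++ t) i files none = calcFileLoopA t (i + l.length) files none := by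
  induction l with
  | nil => intro t i files; simp
  | cons m l ih =>
    intro t i files
    have hm : m < 0 := h m (by simp)
    have hl : ∀ x ∈ l, x < 0 := fun x hx => h x (by simp [hx])
    simp only [List.cons_append, calcFileLoopA]
    rw [if_neg (by omega)]
    rw [ih hl t (i + 1) files]
    congr 1
    simp only [List.length_cons]
    push_cast
    ring

theorem loopA_skip_eq (c : Int) (l : List Int) (h : ∀ x ∈ l, x = c) :
    ∀ (t : List Int) (i s : Int) (files : List (Int × Int × Int)),
      calcFileLoopA (l ++ t) i files (some (s, c)) = calcFileLoopA t (i + l.length) files (some (s, c)) := by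
  induction l with
  | nil => intro t i s files; simp
  | cons m l ih =>
    intro t i s files
    have hm : m = c := h m (by simp)
    have hl : ∀ x ∈ l, x = c := fun x hx => h x (by simp [hx])
    simp only [List.cons_append, calcFileLoopA]
    rw [if_neg (by simp [hm])]
    rw [ih hl t (i + 1) s files]
    congr 1
    simp only [List.length_cons]
    push_cast
    ring

theorem loopA_close (c : Int) (t : List Int) (ht : ∀ m t', t = m :: t' → m ≠ c) :
    ∀ (i s : Int) (files : List (Int × Int × Int)),
      calcFileLoopA t i files (some (s, c)) = calcFileLoopA t i (files ++ [(s, i, i - s)]) none := by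
  intro i s files
  cases t with
  | nil => simp [calcFileLoopA]
  | cons m t' =>
    have : m ≠ c := ht m t' rfl
    simp [calcFileLoopA, this]

theorem head_dropWhile_ne (m : Int) (l : List Int) :
    ∀ x t', l.dropWhile (· = m) = x :: t' → x ≠ m := by
  intro x t' h
  have := List.head_dropWhile_not (p := (· = m)) (l := l) (by simp [h])
  simp only [h, List.head_cons] at this
  simpa using this

-- main A invariant: the state machine computes the forward file list
theorem loopA_eq_fwd :
    ∀ (n : ℕ) (memory : List Int), memory.length ≤ n →
    ∀ (off : Nat) (files : List (Int × Int × Int)),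
      calcFileLoopA memory (off : Int) files none
        = files ++ calcFileFwd (calcFileGroups memory) off := by
  intro n
  induction n with
  | zero =>
    intro memory h off files
    have : memory = [] := List.eq_nil_of_length_eq_zero (Nat.le_zero.mp h)
    subst this
    simp [calcFileLoopA, calcFileGroups, calcFileFwd]
  | succ n ih =>
    intro memory h off files
    cases memory with
    | nil => simp [calcFileLoopA, calcFileGroups, calcFileFwd]
    | cons m rest =>
      have hsplit : rest.takeWhile (· = m) ++ rest.dropWhile (· = m) = rest :=
        List.takeWhile_append_dropWhile
      have hlenrest : rest.length ≤ n := by simpa using h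
      have hlendrop : (rest.dropWhile (· = m)).length ≤ n :=
        le_trans (List.length_dropWhile_le _ _) hlenrest
      have htake : ∀ x ∈ rest.takeWhile (· = m), x = m := by
        intro x hx
        simpa using List.mem_takeWhile_imp hx
      rw [calcFileGroups]
      by_cases hm : (0 : Int) ≤ m
      · have step : calcFileLoopA (m :: rest) (off : Int) files none
            = calcFileLoopA rest ((off : Int) + 1) files (some ((off : Int), m)) := by
          simp [calcFileLoopA, hm]
        rw [step]
        conv_lhs => rw [← hsplit]
        rw [loopA_skip_eq m _ htake]
        rw [loopA_close m _ (fun x t' hx => head_dropWhile_ne m rest x t' hx)]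
        have hcast : (off : Int) + 1 + ((rest.takeWhile (· = m)).length : Int)
            = ((off + (1 + (rest.takeWhile (· = m)).length) : Nat) : Int) := by
          push_cast; ring
        rw [hcast, ih _ hlendrop]
        rw [calcFileFwd, if_pos hm]
        have htrip : ((off + (1 + (rest.takeWhile (· = m)).length) : ℕ) : Int) - (off : Int)
            = (((1 + (rest.takeWhile (· = m)).length) : ℕ) : Int) := by push_cast; ring
        rw [htrip]
        simp
      · have hneg : ∀ x ∈ m :: rest.takeWhile (· = m), x < 0 := by
          intro x hx
          rcases List.mem_cons.mp hx with h1 | h1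
          · omega
          · have := htake x h1; omega
        have hsplit2 : m :: rest = (m :: rest.takeWhile (· = m)) ++ rest.dropWhile (· = m) := by
          simp [hsplit]
        rw [hsplit2, loopA_skip_neg _ hneg]
        have hcast : (off : Int) + ((m :: rest.takeWhile (· = m)).length : Int)
            = ((off + (1 + (rest.takeWhile (· = m)).length) : Nat) : Int) := by
          simp only [List.length_cons]; push_cast; ring
        rw [hcast, ih _ hlendrop]
        rw [calcFileFwd, if_neg hm]
        simp

-- ---------- B side ----------

theorem takeWhile_getD (m : Int) (rest : List Int) (j : Nat)
    (hj : j < (rest.takeWhile (· = m)).length) :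
    (rest.takeWhile (· = m)).getD j 0 = m := by
  rw [List.getD_eq_getElem _ _ hj]
  have : (rest.takeWhile (· = m))[j] ∈ rest.takeWhile (· = m) := List.getElem_mem hj
  simpa using List.mem_takeWhile_imp this

-- boundary structure: the starts of m::rest are 0 followed by the shifted starts
-- of the list after the first run
theorem starts_cons (m : Int) (rest : List Int) :
    calcFileStarts (m :: rest)
      = 0 :: (calcFileStarts (rest.dropWhile (· = m))).map
          (· + (1 + (rest.takeWhile (· = m)).length)) := by
  set t := rest.takeWhile (· = m) with ht
  set d := rest.dropWhile (· = m) with hd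
  have hsplit : t ++ d = rest := List.takeWhile_append_dropWhile
  have hlen : (m :: rest).length = (1 + t.length) + d.length := by
    conv_lhs => rw [← hsplit]
    simp only [List.length_cons, List.length_append]
    omega
  have hmem : m :: rest = (m :: t) ++ d := by simp [hsplit]
  have hlow : ∀ j, j < 1 + t.length → (m :: rest).getD j 0 = m := by
    intro j hjL
    rw [hmem, List.getD_append _ _ _ _ (by simp only [List.length_cons]; omega)]
    cases j with
    | zero => simp
    | succ k =>
      simp only [List.getD_cons_succ]
      exact takeWhile_getD m rest k (by rw [← ht]; omega)
  have hhigh : ∀ j, (m :: rest).getD (j + (1 + t.length)) 0 = d.getD j 0 := by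
    intro j
    rw [hmem, List.getD_append_right _ _ _ _ (by simp only [List.length_cons]; omega)]
    congr 1
    simp only [List.length_cons]
    omega
  unfold calcFileStarts
  rw [hlen, List.range_add, List.filter_append, List.filter_map]
  have hpart1 : (List.range (1 + t.length)).filter
      (fun i => i == 0 || !((m :: rest).getD i 0 == (m :: rest).getD (i - 1) 0)) = [0] := by
    have hcong : ∀ i ∈ List.range (1 + t.length),
        (i == 0 || !((m :: rest).getD i 0 == (m :: rest).getD (i - 1) 0)) = (i == 0) := by
      intro i hi
      have hiL : i < 1 + t.length := List.mem_range.mp hi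
      cases i with
      | zero => simp
      | succ k =>
        have h1 : (m :: rest).getD (k + 1) 0 = m := hlow _ hiL
        have h2 : (m :: rest).getD k 0 = m := hlow _ (by omega)
        simp only [Nat.add_sub_cancel, h1, h2]
        simp
    rw [List.filter_congr hcong]
    rw [List.range_add, List.filter_append, List.filter_map]
    have h0 : (List.range t.length).filter ((fun i => i == 0) ∘ fun x => 1 + x) = [] := by
      apply List.filter_eq_nil_iff.mpr
      intro a _
      simp
    rw [h0]
    simp [List.range_one]
  rw [hpart1]
  have hpart2 : (List.range d.length).filter
      ((fun i => i == 0 || !((m :: rest).getD i 0 == (m :: rest).getD (i - 1) 0)) ∘ fun x => (1 + t.length) + x)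
      = (List.range d.length).filter (fun i => i == 0 || !(d.getD i 0 == d.getD (i - 1) 0)) := by
    apply List.filter_congr
    intro i hi
    have hid : i < d.length := List.mem_range.mp hi
    simp only [Function.comp_apply]
    cases i with
    | zero =>
      have h1 : (m :: rest).getD ((1 + t.length) + 0) 0 = d.getD 0 0 := by rw [Nat.add_comm]; exact hhigh 0
      have h2 : (m :: rest).getD ((1 + t.length) + 0 - 1) 0 = m := hlow _ (by omega)
      obtain ⟨x, d', hxd⟩ : ∃ x d', d = x :: d' := by
        cases hdc : d with
        | nil => rw [hdc] at hid; simp at hid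
        | cons a b => exact ⟨a, b, rfl⟩
      have hx : x ≠ m := head_dropWhile_ne m rest x d' (by rw [← hd]; exact hxd)
      rw [h1, h2, hxd]
      simp [hx]
    | succ k =>
      have h1 : (m :: rest).getD ((1 + t.length) + (k + 1)) 0 = d.getD (k + 1) 0 := by
        rw [Nat.add_comm]; exact hhigh (k + 1)
      have h2 : (m :: rest).getD ((1 + t.length) + (k + 1) - 1) 0 = d.getD k 0 := by
        rw [show (1 + t.length) + (k + 1) - 1 = k + (1 + t.length) by omega]; exact hhigh k
      rw [h1, h2]
      simp only [Nat.add_sub_cancel]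
      simp
  rw [hpart2, List.singleton_append]
  congr 1
  exact List.map_congr_left (fun i _ => Nat.add_comm (1 + t.length) i)

theorem zip_map_shift (L : Nat) : ∀ (A B : List Nat),
    (A.map (· + L)).zip (B.map (· + L)) = (A.zip B).map (fun p => (p.1 + L, p.2 + L)) := by
  intro A
  induction A with
  | nil => intro B; simp
  | cons a A ih =>
    intro B
    cases B with
    | nil => simp
    | cons b B => simp [ih]

theorem pairs_cons (m : Int) (rest : List Int) :
    pairsB (m :: rest)
      = (0, 1 + (rest.takeWhile (· = m)).length)
          :: (pairsB (rest.dropWhile (· = m))).map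
              (fun p => (p.1 + (1 + (rest.takeWhile (· = m)).length),
                         p.2 + (1 + (rest.takeWhile (· = m)).length))) := by
  have hsplit : rest.takeWhile (· = m) ++ rest.dropWhile (· = m) = rest :=
    List.takeWhile_append_dropWhile
  have hlen : (m :: rest).length
      = (1 + (rest.takeWhile (· = m)).length) + (rest.dropWhile (· = m)).length := by
    conv_lhs => rw [← hsplit]
    simp only [List.length_cons, List.length_append]
    omega
  unfold pairsB calcFileEnds
  rw [starts_cons m rest, hlen]
  cases hdd : rest.dropWhile (· = m) with
  | nil =>
    simp [calcFileStarts]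
  | cons x d' =>
    obtain ⟨ss, hss⟩ : ∃ ss, calcFileStarts (x :: d') = 0 :: ss := ⟨_, starts_cons x d'⟩
    rw [hss]
    simp only [List.map_cons, Nat.zero_add, reduceCtorEq, ite_false, List.drop_succ_cons,
      List.drop_zero, List.cons_append, List.zip_cons_cons]
    congr 1
    rw [show ((1 + (rest.takeWhile (· = m)).length)
          :: List.map (· + (1 + (rest.takeWhile (· = m)).length)) ss)
        = ((0 :: ss).map (· + (1 + (rest.takeWhile (· = m)).length))) from by simp]
    rw [show (List.map (· + (1 + (rest.takeWhile (· = m)).length)) ss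
          ++ [1 + (rest.takeWhile (· = m)).length + (x :: d').length])
        = ((ss ++ [(x :: d').length]).map (· + (1 + (rest.takeWhile (· = m)).length))) from by
      simp [Nat.add_comm]]
    rw [zip_map_shift]

-- main B invariant: pairs of mem, shifted by L, filtered against any list that
-- agrees with mem beyond position L, give the forward file list at offset L
theorem pairsB_eq_fwd :
    ∀ (n : ℕ) (mem : List Int), mem.length ≤ n →
    ∀ (L : Nat) (full : List Int),
      (∀ j, j < mem.length → full.getD (j + L) 0 = mem.getD j 0) →
      (((pairsB mem).map (fun p => (p.1 + L, p.2 + L))).filter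
          (fun p => decide ((0 : Int) ≤ full.getD p.1 0))).map
        (fun p => ((p.1 : Int), (p.2 : Int), (p.2 : Int) - (p.1 : Int)))
        = calcFileFwd (calcFileGroups mem) L := by
  intro n
  induction n with
  | zero =>
    intro mem h L full hfull
    have : mem = [] := List.eq_nil_of_length_eq_zero (Nat.le_zero.mp h)
    subst this
    simp [pairsB, calcFileStarts, calcFileEnds, calcFileGroups, calcFileFwd]
  | succ n ih =>
    intro mem h L full hfull
    cases mem with
    | nil => simp [pairsB, calcFileStarts, calcFileEnds, calcFileGroups, calcFileFwd]
    | cons m rest =>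
      have hlenrest : rest.length ≤ n := by simpa using h
      have hlendrop : (rest.dropWhile (· = m)).length ≤ n :=
        le_trans (List.length_dropWhile_le _ _) hlenrest
      have hsplit : rest.takeWhile (· = m) ++ rest.dropWhile (· = m) = rest :=
        List.takeWhile_append_dropWhile
      have hmemlen : (m :: rest).length
          = (1 + (rest.takeWhile (· = m)).length) + (rest.dropWhile (· = m)).length := by
        conv_lhs => rw [← hsplit]
        simp only [List.length_cons, List.length_append]
        omega
      have hfullL : full.getD L 0 = m := by
        have h0 := hfull 0 (by simp)
        rw [Nat.zero_add, List.getD_cons_zero] at h0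
        exact h0
      have hshift : ((pairsB (rest.dropWhile (· = m))).map
            (fun p => (p.1 + (1 + (rest.takeWhile (· = m)).length),
                       p.2 + (1 + (rest.takeWhile (· = m)).length)))).map
            (fun p => (p.1 + L, p.2 + L))
          = (pairsB (rest.dropWhile (· = m))).map
              (fun p => (p.1 + (1 + (rest.takeWhile (· = m)).length + L),
                         p.2 + (1 + (rest.takeWhile (· = m)).length + L))) := by
        rw [List.map_map]
        exact List.map_congr_left (fun p _ => by
          simp only [Function.comp_apply, Nat.add_assoc])
      have hfull' : ∀ j, j < (rest.dropWhile (· = m)).length →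
          full.getD (j + (1 + (rest.takeWhile (· = m)).length + L)) 0
            = (rest.dropWhile (· = m)).getD j 0 := by
        intro j hj
        have h1 := hfull (j + (1 + (rest.takeWhile (· = m)).length)) (by omega)
        have h2 : (m :: rest).getD (j + (1 + (rest.takeWhile (· = m)).length)) 0
            = (rest.dropWhile (· = m)).getD j 0 := by
          have hmem : m :: rest
              = (m :: rest.takeWhile (· = m)) ++ rest.dropWhile (· = m) := by
            simp [hsplit]
          rw [hmem, List.getD_append_right _ _ _ _ (by simp only [List.length_cons]; omega)]
          congr 1
          simp only [List.length_cons]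
          omega
        rw [show j + (1 + (rest.takeWhile (· = m)).length + L)
            = j + (1 + (rest.takeWhile (· = m)).length) + L by omega]
        rw [h1, h2]
      have hrec := ih (rest.dropWhile (· = m)) hlendrop
        (1 + (rest.takeWhile (· = m)).length + L) full hfull'
      have hcomm : 1 + (rest.takeWhile (· = m)).length + L
          = L + (1 + (rest.takeWhile (· = m)).length) := Nat.add_comm _ _
      rw [hcomm] at hrec hshift
      rw [pairs_cons, calcFileGroups]
      simp only [List.map_cons, Nat.zero_add]
      by_cases hm : (0 : Int) ≤ m
      · rw [List.filter_cons,
          if_pos (show (decide ((0 : Int) ≤ full.getD L 0)) = true from by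
            rw [hfullL]; exact decide_eq_true hm),
          List.map_cons, hshift, hrec, calcFileFwd, if_pos hm, List.singleton_append]
        congr 1
        rw [Prod.mk.injEq, Prod.mk.injEq]
        refine ⟨by push_cast; ring, by push_cast; ring, by push_cast; ring⟩
      · rw [List.filter_cons,
          if_neg (show ¬ (decide ((0 : Int) ≤ full.getD L 0)) = true from by
            rw [hfullL]; simp [hm]),
          hshift, hrec, calcFileFwd, if_neg hm, List.nil_append]

theorem map_shift_zero (l : List (Nat × Nat)) :
    l.map (fun p => (p.1 + 0, p.2 + 0)) = l := by
  induction l with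
  | nil => rfl
  | cons a l ih => simp [ih]

-- ===== VERDICT (by name: the statement is the Claim_ definition above) =====
theorem calc_file_spec : Claim_equal_calc_file := by
  intro memory _
  unfold Spec_calc_file calc_file calc_file_alt
  have hA := loopA_eq_fwd memory.length memory le_rfl 0 []
  rw [Nat.cast_zero] at hA
  rw [hA]
  simp only [List.nil_append]
  rw [show ((calcFileStarts memory).zip (calcFileEnds memory)) = pairsB memory from rfl]
  rw [List.filter_reverse, List.map_reverse]
  congr 1
  have := pairsB_eq_fwd memory.length memory le_rfl 0 memory (by intro j _; simp)
  rw [map_shift_zero] at this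
  exact this.symm
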